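-- pv_equiv track=rewrite | github.com/miliar/Code_Jam_Webscraper | solutions_python/solutions_year17_round1_nr1/245.py | one_line
-- ===== SOURCE A (Python) =====
-- def one_line(row):
--     #assert row != '?' * len(row)
--     for c in row:
--         if c != '?':
--             first = c
--             break
--     res = []
--     char_to_fill = first
--     for c in row:
--         if c == '?':
--             res.append(char_to_fill)
--         else:
--             char_to_fill = c
--             res.append(char_to_fill)
--     return ''.join(res)
-- ===== SOURCE B (Python) =====
-- def one_line(row):
--     first = next(c for c in row if c != '?')
--     parts = []
--     fill = first
--     i = 0
--     n = len(row)
--     while i < n: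
--         j = i
--         while j < n and row[j] == '?':
--             j += 1
--         parts.append(fill * (j - i))
--         if j < n:
--             fill = row[j]
--             parts.append(fill)
--         i = j + 1
--     return ''.join(parts)
-- ===== Notes on version B (the rewrite author's own statement) =====
-- stated objective: alternative
-- what changed: B processes the row run-by-run: it locates each maximal '?'-run with an inner scan and emits it as one multiplied string fill*(j-i), instead of A's per-character loop carrying char_to_fill and appending one char at a time.
-- outside the precondition, e.g. on one_line('?'): A raises UnboundLocalError, B raises StopIteration
import Mathlib
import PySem

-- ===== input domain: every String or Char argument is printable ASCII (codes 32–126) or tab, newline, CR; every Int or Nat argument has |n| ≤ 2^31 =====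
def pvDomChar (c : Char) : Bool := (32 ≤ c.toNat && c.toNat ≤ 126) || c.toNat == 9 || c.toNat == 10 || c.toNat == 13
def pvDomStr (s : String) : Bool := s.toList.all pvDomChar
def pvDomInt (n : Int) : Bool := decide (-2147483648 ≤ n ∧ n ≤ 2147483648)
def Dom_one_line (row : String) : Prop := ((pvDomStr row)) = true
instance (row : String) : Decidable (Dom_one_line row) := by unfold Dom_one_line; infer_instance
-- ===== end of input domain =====

-- B fills '?'-runs run-by-run with a replicated string instead of A's per-character carry loop (alternative decomposition, same cost).

-- ===== PORT A =====
-- A's first loop with break: first non-'?' character (none = A raises UnboundLocalError)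
def findFirstA : List Char → Option Char
  | [] => none
  | c :: t => if c ≠ '?' then some c else findFirstA t

-- A's second loop: per-character, carrying char_to_fill
def runA (fill : Char) : List Char → List Char
  | [] => []
  | c :: t => if c = '?' then fill :: runA fill t else c :: runA c t

def one_line (row : String) : String :=
  match findFirstA row.toList with
  | none => ""   -- Python A raises UnboundLocalError here; excluded by Pre_one_line
  | some first => String.ofList (runA first row.toList)

-- ===== PORT B =====
-- Source B's outer while loop: take the '?'-run (inner while = takeWhile), emit fill*(run length),
-- then the non-'?' char (if any) becomes the new fill
def runB (fill : Char) (l : List Char) : List Char :=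
  List.replicate (l.takeWhile (· = '?')).length fill ++
    (if hr : l.dropWhile (· = '?') = [] then []
     else (l.dropWhile (· = '?')).head hr ::
          runB ((l.dropWhile (· = '?')).head hr) ((l.dropWhile (· = '?')).tail))
termination_by l.length
decreasing_by
  have h1 : (l.dropWhile (· = '?')).length ≤ l.length := List.length_dropWhile_le _ _
  have h2 : (l.dropWhile (· = '?')).length ≠ 0 := by simpa using hr
  simp [List.length_tail]
  omega

def one_line_alt (row : String) : String :=
  match row.toList.find? (· ≠ '?') with   -- Source B's next(...): raises StopIteration when none; excluded by Pre_one_line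
  | none => ""
  | some first => String.ofList (runB first row.toList)

-- ===== PRECONDITION & SPEC =====
-- Pre_ excludes exactly the rows with no non-'?' character (empty or all-'?'), on which
-- Python A raises UnboundLocalError (and Source B raises StopIteration).
def Pre_one_line (row : String) : Prop := row.toList.any (· ≠ '?') = true
instance (row : String) : Decidable (Pre_one_line row) := by unfold Pre_one_line; infer_instance
def pvWitness_one_line : String := "?a?"

def Spec_one_line (row : String) (out : String) : Prop := out = one_line_alt row
instance (row : String) (out : String) : Decidable (Spec_one_line row out) := by unfold Spec_one_line; infer_instance

-- ===== CLAIM (what is proved, stated in full; the proofs are below) =====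
def Claim_equal_one_line : Prop := ∀ (row : String), Dom_one_line row → Pre_one_line row → Spec_one_line row (one_line row)

-- ===== LEMMAS AND PROOFS =====
theorem findFirstA_eq_find? (l : List Char) : findFirstA l = l.find? (· ≠ '?') := by
  induction l with
  | nil => rfl
  | cons c t ih =>
    by_cases hc : c = '?'
    · simp [findFirstA, List.find?, hc, ih]
    · simp [findFirstA, List.find?, hc]

theorem runB_nil (fill : Char) : runB fill [] = [] := by
  rw [runB]; simp

theorem runB_cons_q (fill : Char) (t : List Char) :
    runB fill ('?' :: t) = fill :: runB fill t := by
  rw [runB, runB]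
  simp [List.takeWhile, List.dropWhile, List.replicate_succ]

theorem runB_cons_ne (fill c : Char) (t : List Char) (hc : c ≠ '?') :
    runB fill (c :: t) = c :: runB c t := by
  rw [runB]
  simp [List.takeWhile, List.dropWhile, hc]

theorem runA_eq_runB (l : List Char) : ∀ fill, runA fill l = runB fill l := by
  induction l with
  | nil => intro fill; simp [runA, runB_nil]
  | cons c t ih =>
    intro fill
    by_cases hc : c = '?'
    · subst hc; simp [runA, runB_cons_q, ih]
    · simp [runA, hc, runB_cons_ne _ _ _ hc, ih]

-- ===== VERDICT (by name: the statement is the Claim_ definition above) =====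
theorem one_line_spec : Claim_equal_one_line := by
  intro row _ _
  unfold Spec_one_line one_line one_line_alt
  rw [findFirstA_eq_find?]
  cases row.toList.find? (· ≠ '?') with
  | none => rfl
  | some first => simp [runA_eq_runB]
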